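-- pv_equiv track=rewrite | github.com/gomezportillo/word_index_generator | generar_indice.py | limpiar_partes_de_linea
-- ===== SOURCE A (Python) =====
-- def limpiar_partes_de_linea(texto):
--     """
--     Revisa si hay palabras partidas y las junta.
--     """
--     lineas = texto.strip().split('\n')
--     texto_limpio = ""
--
--     for i in range(len(lineas)):
--         linea_actual = lineas[i].strip()
--
--         if i > 0 and lineas[i - 1].rstrip().endswith('-'):
--             # Quitar guion al final de la línea anterior y unir sin espacio
--             texto_limpio = texto_limpio.rstrip()[:-1] + linea_actual
--         else:
--             # Añadir un espacio entre líneas normales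
--             texto_limpio += ' ' + linea_actual
--
--     return texto_limpio.strip()
-- ===== SOURCE B (Python) =====
-- def limpiar_partes_de_linea(texto):
--     lineas = [l.strip() for l in texto.strip().split('\n')]
--     s = '\n'.join(lineas)
--     return s.replace('-\n', '').replace('\n', ' ').strip()
-- ===== Notes on version B (the rewrite author's own statement) =====
-- stated objective: idiomatic
-- what changed: Replaces the index loop with a lookback on the previous line and a growing string accumulator by stripping all lines up front, rejoining them, and performing two global substitutions: one deletes each hyphen-plus-linebreak pair (merging hyphen-split words), the next turns each remaining line break into a space.
import Mathlib
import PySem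

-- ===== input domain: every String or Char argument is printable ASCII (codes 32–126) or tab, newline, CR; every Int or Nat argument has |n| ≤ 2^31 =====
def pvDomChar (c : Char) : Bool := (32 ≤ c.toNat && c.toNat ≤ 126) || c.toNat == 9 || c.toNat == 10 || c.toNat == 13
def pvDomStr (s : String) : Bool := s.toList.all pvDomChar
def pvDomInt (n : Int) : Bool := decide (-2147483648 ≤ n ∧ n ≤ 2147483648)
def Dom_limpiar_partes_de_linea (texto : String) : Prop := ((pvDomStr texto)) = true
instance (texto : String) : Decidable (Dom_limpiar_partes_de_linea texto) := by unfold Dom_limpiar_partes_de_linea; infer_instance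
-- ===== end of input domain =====

-- B rebuilds the text from the stripped lines and merges hyphen-split words with two global
-- substitutions (delete each hyphen-plus-linebreak pair, then turn remaining line breaks into
-- spaces) instead of A's index loop with a lookback on the previous line and a growing
-- accumulator; objective: more idiomatic.

-- ===== PORT A =====
def limpiar_partes_de_linea (texto : String) : String :=
  let lineas : List (List Char) := PySem.Chars.splitOn (PySem.Chars.strip texto.toList) ['\n']
  let texto_limpio : List Char :=
    (PySem.List.pyRange 0 (lineas.length : Int) 1).foldl (fun acc i =>
      let linea_actual := PySem.Chars.strip ((PySem.List.pyGet? lineas i).getD [])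
      if decide ((0:Int) < i) &&
         PySem.Chars.endswith (PySem.Chars.rstrip ((PySem.List.pyGet? lineas (i - 1)).getD [])) ['-'] then
        PySem.List.slice (PySem.Chars.rstrip acc) none (some (-1)) ++ linea_actual
      else
        acc ++ ' ' :: linea_actual) []
  String.ofList (PySem.Chars.strip texto_limpio)

-- ===== PORT B =====
def limpiar_partes_de_linea_alt (texto : String) : String :=
  let lineas : List (List Char) :=
    (PySem.Chars.splitOn (PySem.Chars.strip texto.toList) ['\n']).map PySem.Chars.strip
  let s : List Char := PySem.Chars.join ['\n'] lineas
  String.ofList (PySem.Chars.strip (PySem.Chars.replace (PySem.Chars.replace s ['-', '\n'] []) ['\n'] [' ']))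

-- ===== PRECONDITION & SPEC =====
def Spec_limpiar_partes_de_linea (texto : String) (out : String) : Prop := out = limpiar_partes_de_linea_alt texto
instance (texto : String) (out : String) : Decidable (Spec_limpiar_partes_de_linea texto out) := by unfold Spec_limpiar_partes_de_linea; infer_instance

-- ===== CLAIM (what is proved, stated in full; the proofs are below) =====
def Claim_equal_limpiar_partes_de_linea : Prop := ∀ (texto : String), Dom_limpiar_partes_de_linea texto → Spec_limpiar_partes_de_linea texto (limpiar_partes_de_linea texto)

-- ===== LEMMAS AND PROOFS =====

-- the single-character substitution performed by replace('\n', ' ')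
def pvSub (c : Char) : Char := if c = '\n' then ' ' else c

-- greedy left-to-right removal of the two-character pattern "-\n" (what replace('-\n','') does)
def pvR1 : List Char → List Char
  | '-' :: '\n' :: rest => pvR1 rest
  | c :: rest => c :: pvR1 rest
  | [] => []

-- the common merge of a nonempty list of stripped lines: the first argument is the last
-- line already emitted, the remaining lines are attached to it one by one
def pvMerge : List Char → List (List Char) → List Char
  | prev, [] => prev
  | prev, l :: ls =>
      (if prev.getLast? = some '-' then prev.dropLast else prev ++ [' ']) ++ pvMerge l ls

-- A's loop, rephrased on the list of lines with the previous (raw) line carried along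
def pvFoldA : List Char → List Char → List (List Char) → List Char
  | acc, _, [] => acc
  | acc, prev, l :: ls =>
      pvFoldA
        (if PySem.Chars.endswith (PySem.Chars.rstrip prev) ['-'] then
          PySem.List.slice (PySem.Chars.rstrip acc) none (some (-1)) ++ PySem.Chars.strip l
        else acc ++ ' ' :: PySem.Chars.strip l) l ls

lemma pv_endswith_single (s : List Char) (c : Char) :
    PySem.Chars.endswith s [c] = true ↔ s.getLast? = some c := by
  rw [PySem.Chars.endswith_iff, List.getLast?_eq_some_iff]
  constructor
  · rintro ⟨t, rfl⟩; exact ⟨t, rfl⟩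
  · rintro ⟨ys, rfl⟩; exact ⟨ys, rfl⟩

lemma pv_rstrip_cons (c : Char) (t : List Char) :
    PySem.Chars.rstrip (c :: t) =
      if PySem.Chars.rstrip t = [] then (if PySem.Chars.isspace c then [] else [c])
      else c :: PySem.Chars.rstrip t := by
  simp only [PySem.Chars.rstrip, List.reverse_cons, List.dropWhile_append]
  by_cases h : (List.dropWhile PySem.Chars.isspace t.reverse).isEmpty
  · simp [List.isEmpty_iff.mp h, List.dropWhile]
    by_cases hc : PySem.Chars.isspace c <;> simp [hc]
  · have h' : (List.dropWhile PySem.Chars.isspace t.reverse).reverse ≠ [] := by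
      simp [List.isEmpty_iff] at h; simpa using h
    simp [h, h']

lemma pv_lstrip_cons_space {c : Char} (hc : PySem.Chars.isspace c = true) (x : List Char) :
    PySem.Chars.lstrip (c :: x) = PySem.Chars.lstrip x := by
  simp [PySem.Chars.lstrip, List.dropWhile, hc]

lemma pv_lstrip_cons_nospace {c : Char} (hc : PySem.Chars.isspace c = false) (x : List Char) :
    PySem.Chars.lstrip (c :: x) = c :: x := by
  simp [PySem.Chars.lstrip, List.dropWhile, hc]

lemma pv_strip_comm (s : List Char) :
    PySem.Chars.strip s = PySem.Chars.lstrip (PySem.Chars.rstrip s) := by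
  show PySem.Chars.rstrip (PySem.Chars.lstrip s) = PySem.Chars.lstrip (PySem.Chars.rstrip s)
  induction s with
  | nil => rfl
  | cons c t ih =>
    rw [pv_rstrip_cons]
    by_cases hc : PySem.Chars.isspace c
    · by_cases h0 : PySem.Chars.rstrip t = []
      · rw [if_pos h0, if_pos hc, pv_lstrip_cons_space hc, ih, h0]
      · rw [if_neg h0, pv_lstrip_cons_space hc, ih, pv_lstrip_cons_space hc]
    · have hc' : PySem.Chars.isspace c = false := by simpa using hc
      rw [pv_lstrip_cons_nospace hc', pv_rstrip_cons]
      by_cases h0 : PySem.Chars.rstrip t = []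
      · rw [if_pos h0, if_neg hc]
        exact (pv_lstrip_cons_nospace hc' []).symm
      · rw [if_neg h0]
        exact (pv_lstrip_cons_nospace hc' _).symm

lemma pv_getLast_strip (s : List Char) (c : Char) (hc : PySem.Chars.isspace c = false) :
    (PySem.Chars.strip s).getLast? = some c ↔ (PySem.Chars.rstrip s).getLast? = some c := by
  rw [pv_strip_comm]
  constructor
  · intro h
    rw [List.getLast?_eq_some_iff] at h ⊢
    obtain ⟨ys, hys⟩ := h
    have hsuf : PySem.Chars.lstrip (PySem.Chars.rstrip s) <:+ PySem.Chars.rstrip s := by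
      simpa [PySem.Chars.lstrip] using
        (List.dropWhile_suffix (p := PySem.Chars.isspace) (l := PySem.Chars.rstrip s))
    obtain ⟨pre, hpre⟩ := hsuf
    exact ⟨pre ++ ys, by rw [← hpre, hys, List.append_assoc]⟩
  · intro h
    rw [List.getLast?_eq_some_iff] at h
    obtain ⟨ys, hys⟩ := h
    rw [hys]
    show (List.dropWhile PySem.Chars.isspace (ys ++ [c])).getLast? = some c
    rw [List.dropWhile_append]
    by_cases h : (List.dropWhile PySem.Chars.isspace ys).isEmpty
    · simp [h, List.dropWhile, hc]
    · simp [h]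

lemma pv_rstrip_eq_self (s : List Char) (c : Char) (hc : PySem.Chars.isspace c = false)
    (h : s.getLast? = some c) : PySem.Chars.rstrip s = s := by
  rw [List.getLast?_eq_some_iff] at h
  obtain ⟨ys, rfl⟩ := h
  simp [PySem.Chars.rstrip, hc]

lemma pv_strip_cons_space (x : List Char) :
    PySem.Chars.strip (' ' :: x) = PySem.Chars.strip x := by
  show PySem.Chars.rstrip (PySem.Chars.lstrip (' ' :: x)) = _
  rw [pv_lstrip_cons_space (by decide) x]; rfl

lemma pv_mem_strip {c : Char} {l : List Char} (h : c ∈ PySem.Chars.strip l) : c ∈ l := by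
  have h1 : c ∈ PySem.Chars.lstrip l := by
    have h' := h
    rw [PySem.Chars.strip] at h'
    unfold PySem.Chars.rstrip at h'
    rw [List.mem_reverse] at h'
    exact List.mem_reverse.mp ((List.dropWhile_sublist _).subset h')
  exact (List.dropWhile_sublist _).subset h1

lemma pv_splitOn_go (fuel : ℕ) :
    ∀ (l cur : List Char) (acc : List (List Char)), l.length < fuel → '\n' ∉ cur →
      (∀ x ∈ acc, '\n' ∉ x) →
      PySem.Chars.splitOn.go ['\n'] fuel l cur acc ≠ [] ∧
        ∀ x ∈ PySem.Chars.splitOn.go ['\n'] fuel l cur acc, '\n' ∉ x := by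
  induction fuel with
  | zero => intro l cur acc h _ _; omega
  | succ f ih =>
    intro l cur acc hlen hcur hacc
    match l with
    | [] =>
      rw [show PySem.Chars.splitOn.go ['\n'] (f+1) [] cur acc = (cur.reverse :: acc).reverse from rfl]
      refine ⟨by simp, ?_⟩
      intro x hx
      rw [List.mem_reverse, List.mem_cons] at hx
      rcases hx with h | h
      · subst h; simpa using hcur
      · exact hacc x h
    | c :: rest =>
      by_cases hc : c = '\n'
      · subst hc
        have e : PySem.Chars.splitOn.go ['\n'] (f+1) ('\n' :: rest) cur acc
            = PySem.Chars.splitOn.go ['\n'] f rest [] (cur.reverse :: acc) := by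
          show (if _ = true then _ else _) = _
          rw [if_pos (by simp [List.isPrefixOf])]
          rfl
        rw [e]
        refine ih rest [] (cur.reverse :: acc) (by simp at hlen ⊢; omega) (by simp) ?_
        intro x hx
        rw [List.mem_cons] at hx
        rcases hx with h | h
        · subst h; simpa using hcur
        · exact hacc x h
      · have e : PySem.Chars.splitOn.go ['\n'] (f+1) (c :: rest) cur acc
            = PySem.Chars.splitOn.go ['\n'] f rest (c :: cur) acc := by
          show (if _ = true then _ else _) = _
          rw [if_neg (by simp [List.isPrefixOf]; exact fun h => hc h.symm)]
        rw [e]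
        refine ih rest (c :: cur) acc (by simp at hlen ⊢; omega) ?_ hacc
        intro hx
        rcases List.mem_cons.mp hx with h | h
        · exact hc h.symm
        · exact hcur h

lemma pv_splitOn_ne_nil (s : List Char) : PySem.Chars.splitOn s ['\n'] ≠ [] :=
  (pv_splitOn_go (s.length + 1) s [] [] (by omega) (by simp) (by simp)).1

lemma pv_splitOn_no_nl (s : List Char) : ∀ x ∈ PySem.Chars.splitOn s ['\n'], '\n' ∉ x :=
  (pv_splitOn_go (s.length + 1) s [] [] (by omega) (by simp) (by simp)).2

lemma pvR1_cons {c : Char} {t : List Char} (h : c ≠ '-' ∨ t.head? ≠ some '\n') :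
    pvR1 (c :: t) = c :: pvR1 t := by
  match t with
  | [] => cases h' : c == '-' <;> simp [pvR1]
  | d :: t' =>
    rw [pvR1.eq_def]
    split
    · rename_i heq
      injection heq with h1 h2; injection h2 with h2 _
      simp [h1, h2] at h
    · rename_i heq; injection heq with h1 h2; subst h1; subst h2; rfl
    · rename_i heq; cases heq

lemma pvR1_no_nl {s : List Char} (h : '\n' ∉ s) : pvR1 s = s := by
  induction s with
  | nil => rfl
  | cons c t ih =>
    rw [pvR1_cons (Or.inr ?_), ih (fun hm => h (List.mem_cons_of_mem _ hm))]
    intro hh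
    exact h (List.mem_cons_of_mem _ (by
      cases t with
      | nil => simp at hh
      | cons d t' => simp at hh; simp [hh]))

lemma pvR1_line {l : List Char} (h : '\n' ∉ l) (rest : List Char) :
    pvR1 (l ++ '\n' :: rest) =
      (if l.getLast? = some '-' then l.dropLast else l ++ ['\n']) ++ pvR1 rest := by
  induction l with
  | nil =>
    simp only [List.nil_append]
    rw [pvR1_cons (Or.inl (by decide))]
    simp
  | cons c t ih =>
    have hnt : '\n' ∉ t := fun hm => h (List.mem_cons_of_mem _ hm)
    have hcn : c ≠ '\n' := fun hh => h (by simp [hh])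
    cases t with
    | nil =>
      by_cases hc : c = '-'
      · subst hc; simp [pvR1]
      · rw [List.cons_append, List.nil_append, pvR1_cons (Or.inl hc),
          pvR1_cons (Or.inl (by decide))]
        simp [hc]
    | cons d t' =>
      have hd : d ≠ '\n' := fun hh => hnt (by simp [hh])
      rw [List.cons_append, pvR1_cons (Or.inr (by simp [hd])), ih hnt]
      by_cases hl : (d :: t').getLast? = some '-'
      · simp [hl]
      · simp [hl]

lemma pv_replace_go1 (fuel : ℕ) :
    ∀ (s acc : List Char), s.length ≤ fuel →
      PySem.Chars.replace.go ['-', '\n'] [] fuel s acc = acc.reverse ++ pvR1 s := by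
  induction fuel with
  | zero =>
    intro s acc h
    have : s = [] := by cases s <;> simp_all
    subst this; rfl
  | succ f ih =>
    intro s acc h
    match s with
    | [] =>
      rw [show PySem.Chars.replace.go ['-', '\n'] [] (f+1) [] acc = acc.reverse from rfl]
      simp [pvR1]
    | c :: t =>
      by_cases hp : (['-', '\n'] : List Char).isPrefixOf (c :: t) = true
      · obtain ⟨h1, t', h2⟩ : c = '-' ∧ ∃ t', t = '\n' :: t' := by
          cases t with
          | nil => simp [List.isPrefixOf] at hp
          | cons d t' =>
            simp [List.isPrefixOf] at hp
            exact ⟨hp.1.symm, t', by rw [← hp.2]⟩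
        subst h1; subst h2
        have e : PySem.Chars.replace.go ['-', '\n'] [] (f+1) ('-' :: '\n' :: t') acc
            = PySem.Chars.replace.go ['-', '\n'] [] f t' acc := by
          show (if _ = true then _ else _) = _
          rw [if_pos (by simp [List.isPrefixOf])]
          rfl
        rw [e, ih t' acc (by simp at h; omega)]
        rfl
      · have e : PySem.Chars.replace.go ['-', '\n'] [] (f+1) (c :: t) acc
            = PySem.Chars.replace.go ['-', '\n'] [] f t (c :: acc) := by
          show (if _ = true then _ else _) = _
          rw [if_neg hp]
        rw [e, ih t (c :: acc) (by simp at h; omega)]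
        have hc : c ≠ '-' ∨ t.head? ≠ some '\n' := by
          by_contra hcon
          rw [not_or, not_not, not_not] at hcon
          obtain ⟨h1, h2⟩ := hcon
          subst h1
          cases t with
          | nil => simp at h2
          | cons d t' =>
            simp at h2
            subst h2
            simp [List.isPrefixOf] at hp
        rw [pvR1_cons hc]
        simp

lemma pv_replace_go2 (fuel : ℕ) :
    ∀ (s acc : List Char), s.length ≤ fuel →
      PySem.Chars.replace.go ['\n'] [' '] fuel s acc = acc.reverse ++ s.map pvSub := by
  induction fuel with
  | zero =>
    intro s acc h
    have : s = [] := by cases s <;> simp_all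
    subst this; rfl
  | succ f ih =>
    intro s acc h
    match s with
    | [] =>
      rw [show PySem.Chars.replace.go ['\n'] [' '] (f+1) [] acc = acc.reverse from rfl]
      simp
    | c :: t =>
      by_cases hc : c = '\n'
      · subst hc
        have e : PySem.Chars.replace.go ['\n'] [' '] (f+1) ('\n' :: t) acc
            = PySem.Chars.replace.go ['\n'] [' '] f t (' ' :: acc) := by
          show (if _ = true then _ else _) = _
          rw [if_pos (by simp [List.isPrefixOf])]
          rfl
        rw [e, ih t (' ' :: acc) (by simp at h; omega)]
        simp [pvSub]
      · have e : PySem.Chars.replace.go ['\n'] [' '] (f+1) (c :: t) acc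
            = PySem.Chars.replace.go ['\n'] [' '] f t (c :: acc) := by
          show (if _ = true then _ else _) = _
          rw [if_neg (by simp [List.isPrefixOf]; exact fun hh => hc hh.symm)]
        rw [e, ih t (c :: acc) (by simp at h; omega)]
        simp [pvSub, hc]

lemma pv_replace1 (s : List Char) : PySem.Chars.replace s ['-', '\n'] [] = pvR1 s := by
  show (if _ = true then _ else _) = _
  rw [if_neg (by decide)]
  simpa using pv_replace_go1 s.length s [] le_rfl

lemma pv_replace2 (s : List Char) : PySem.Chars.replace s ['\n'] [' '] = s.map pvSub := by
  show (if _ = true then _ else _) = _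
  rw [if_neg (by decide)]
  simpa using pv_replace_go2 s.length s [] le_rfl

lemma pv_map_sub_id {x : List Char} (h : '\n' ∉ x) : x.map pvSub = x := by
  conv_rhs => rw [← List.map_id x]
  exact List.map_congr_left (fun c hc => by
    simp [pvSub]; intro hcc; subst hcc; exact absurd hc h)

lemma pv_B_merge (ls : List (List Char)) :
    ∀ (l : List Char), '\n' ∉ l → (∀ x ∈ ls, '\n' ∉ x) →
      (pvR1 (List.intercalate ['\n'] (l :: ls))).map pvSub = pvMerge l ls := by
  induction ls with
  | nil =>
    intro l hl _
    rw [show List.intercalate ['\n'] [l] = l by simp [List.intercalate]]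
    rw [pvR1_no_nl hl, pv_map_sub_id hl]
    rfl
  | cons l' ls ih =>
    intro l hl hls
    rw [show List.intercalate ['\n'] (l :: l' :: ls)
          = l ++ ['\n'] ++ List.intercalate ['\n'] (l' :: ls) by simp [List.intercalate]]
    rw [List.append_assoc, List.singleton_append, pvR1_line hl, List.map_append,
      ih l' (hls l' (by simp)) (fun x hx => hls x (by simp [hx]))]
    congr 1
    by_cases hg : l.getLast? = some '-'
    · rw [if_pos hg, if_pos hg, pv_map_sub_id]
      intro hm
      exact hl ((List.dropLast_sublist l).subset hm)
    · rw [if_neg hg, if_neg hg, List.map_append, pv_map_sub_id hl]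
      rfl

lemma pv_foldA_merge (ls : List (List Char)) :
    ∀ (prev p : List Char),
      pvFoldA (p ++ PySem.Chars.strip prev) prev ls
        = p ++ pvMerge (PySem.Chars.strip prev) (ls.map PySem.Chars.strip) := by
  induction ls with
  | nil => intro prev p; rfl
  | cons l ls ih =>
    intro prev p
    by_cases hb : PySem.Chars.endswith (PySem.Chars.rstrip prev) ['-'] = true
    · have hgr : (PySem.Chars.rstrip prev).getLast? = some '-' := (pv_endswith_single _ _).mp hb
      have hgs : (PySem.Chars.strip prev).getLast? = some '-' :=
        (pv_getLast_strip prev '-' (by decide)).mpr hgr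
      have hne : PySem.Chars.strip prev ≠ [] := by
        intro h0; rw [h0] at hgs; simp at hgs
      have hacc : (p ++ PySem.Chars.strip prev).getLast? = some '-' := by
        obtain ⟨ys, hys⟩ := List.getLast?_eq_some_iff.mp hgs
        rw [hys, ← List.append_assoc, List.getLast?_eq_some_iff]
        exact ⟨p ++ ys, rfl⟩
      show pvFoldA _ l ls = _
      rw [if_pos hb, pv_rstrip_eq_self _ '-' (by decide) hacc,
        PySem.List.slice_to_neg_one, List.dropLast_append_of_ne_nil hne,
        List.append_assoc, ← List.append_assoc, ih l (p ++ (PySem.Chars.strip prev).dropLast)]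
      show _ = p ++ pvMerge (PySem.Chars.strip prev) (PySem.Chars.strip l :: ls.map PySem.Chars.strip)
      rw [show pvMerge (PySem.Chars.strip prev) (PySem.Chars.strip l :: ls.map PySem.Chars.strip)
            = (if (PySem.Chars.strip prev).getLast? = some '-' then (PySem.Chars.strip prev).dropLast
               else PySem.Chars.strip prev ++ [' ']) ++ pvMerge (PySem.Chars.strip l) (ls.map PySem.Chars.strip) from rfl]
      rw [if_pos hgs, List.append_assoc]
    · have hgs : ¬ (PySem.Chars.strip prev).getLast? = some '-' := by
        intro h
        exact hb ((pv_endswith_single _ _).mpr ((pv_getLast_strip prev '-' (by decide)).mp h))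
      show pvFoldA _ l ls = _
      rw [if_neg (by simp [hb])]
      have e1 : (p ++ PySem.Chars.strip prev) ++ ' ' :: PySem.Chars.strip l
          = (p ++ PySem.Chars.strip prev ++ [' ']) ++ PySem.Chars.strip l := by simp
      rw [e1, ih l (p ++ PySem.Chars.strip prev ++ [' '])]
      show _ = p ++ pvMerge (PySem.Chars.strip prev) (PySem.Chars.strip l :: ls.map PySem.Chars.strip)
      rw [show pvMerge (PySem.Chars.strip prev) (PySem.Chars.strip l :: ls.map PySem.Chars.strip)
            = (if (PySem.Chars.strip prev).getLast? = some '-' then (PySem.Chars.strip prev).dropLast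
               else PySem.Chars.strip prev ++ [' ']) ++ pvMerge (PySem.Chars.strip l) (ls.map PySem.Chars.strip) from rfl]
      rw [if_neg hgs]
      simp

lemma pv_A_fold (L : List (List Char)) (m : ℕ) :
    ∀ (a : ℕ) (acc : List Char), 1 ≤ a → a + m = L.length →
      ((List.range' a m).map (fun k => Int.ofNat k)).foldl
        (fun acc i =>
          let linea_actual := PySem.Chars.strip ((PySem.List.pyGet? L i).getD [])
          if decide ((0:Int) < i) &&
             PySem.Chars.endswith (PySem.Chars.rstrip ((PySem.List.pyGet? L (i - 1)).getD [])) ['-'] then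
            PySem.List.slice (PySem.Chars.rstrip acc) none (some (-1)) ++ linea_actual
          else acc ++ ' ' :: linea_actual) acc
      = pvFoldA acc (L.getD (a - 1) []) (L.drop a) := by
  induction m with
  | zero =>
    intro a acc ha hlen
    have : L.drop a = [] := by
      rw [show a = L.length by omega]; exact List.drop_length
    rw [this]
    rfl
  | succ m ih =>
    intro a acc ha hlen
    have haL : a < L.length := by omega
    rw [List.range'_succ, List.map_cons, List.foldl_cons]
    have hget : PySem.List.pyGet? L (a : Int) = some L[a] := by
      rw [PySem.List.pyGet?_natCast, List.getElem?_eq_getElem haL]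
    have hcast : ((a : Int) - 1) = ((a - 1 : ℕ) : Int) := by omega
    have hget' : PySem.List.pyGet? L ((a : Int) - 1) = some (L.getD (a-1) []) := by
      rw [hcast, PySem.List.pyGet?_natCast, List.getD_eq_getElem?_getD,
        List.getElem?_eq_getElem (by omega : a - 1 < L.length)]
      simp
    have hpos : decide ((0:Int) < (a : Int)) = true := by simp; omega
    have hdrop : L.drop a = L[a] :: L.drop (a+1) := List.drop_eq_getElem_cons haL
    rw [hdrop]
    show _ = pvFoldA _ _ (L[a] :: L.drop (a+1))
    rw [show pvFoldA acc (L.getD (a-1) []) (L[a] :: L.drop (a+1))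
          = pvFoldA
              (if PySem.Chars.endswith (PySem.Chars.rstrip (L.getD (a-1) [])) ['-'] then
                PySem.List.slice (PySem.Chars.rstrip acc) none (some (-1)) ++ PySem.Chars.strip L[a]
              else acc ++ ' ' :: PySem.Chars.strip L[a]) L[a] (L.drop (a+1)) from rfl]
    have := ih (a+1) (if PySem.Chars.endswith (PySem.Chars.rstrip (L.getD (a-1) [])) ['-'] then
                PySem.List.slice (PySem.Chars.rstrip acc) none (some (-1)) ++ PySem.Chars.strip L[a]
              else acc ++ ' ' :: PySem.Chars.strip L[a]) (by omega) (by omega)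
    simp only [Nat.add_sub_cancel] at this
    have hg2 : L.getD a ([] : List Char) = L[a] := by
      simp [List.getD_eq_getElem?_getD, List.getElem?_eq_getElem haL]
    rw [hg2] at this
    rw [← this]
    congr 1
    simp only [Int.ofNat_eq_natCast, hget, hget', hpos, Option.getD_some, Bool.true_and]

-- ===== VERDICT (by name: the statement is the Claim_ definition above) =====
theorem limpiar_partes_de_linea_spec : Claim_equal_limpiar_partes_de_linea := by
  intro texto _
  show limpiar_partes_de_linea texto = limpiar_partes_de_linea_alt texto
  unfold limpiar_partes_de_linea limpiar_partes_de_linea_alt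
  obtain ⟨l0, ls, hcons⟩ : ∃ l0 ls,
      PySem.Chars.splitOn (PySem.Chars.strip texto.toList) ['\n'] = l0 :: ls := by
    cases h : PySem.Chars.splitOn (PySem.Chars.strip texto.toList) ['\n'] with
    | nil => exact absurd h (pv_splitOn_ne_nil _)
    | cons a b => exact ⟨a, b, rfl⟩
  have hnl := pv_splitOn_no_nl (PySem.Chars.strip texto.toList)
  rw [hcons] at hnl
  simp only [hcons]
  rw [show ((l0 :: ls).length : Int) = ((ls.length + 1 : ℕ) : Int) by simp,
    PySem.List.pyRange_zero_natCast]
  have h1 : '\n' ∉ PySem.Chars.strip l0 :=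
    fun h => hnl l0 (List.mem_cons_self) (pv_mem_strip h)
  have h2 : ∀ x ∈ ls.map PySem.Chars.strip, '\n' ∉ x := by
    intro x hx
    obtain ⟨y, hy, rfl⟩ := List.mem_map.mp hx
    exact fun h => hnl y (List.mem_cons_of_mem _ hy) (pv_mem_strip h)
  rw [show PySem.Chars.join ['\n'] (List.map PySem.Chars.strip (l0 :: ls))
        = List.intercalate ['\n'] (PySem.Chars.strip l0 :: ls.map PySem.Chars.strip) by
      simp [PySem.Chars.join]]
  rw [pv_replace1, pv_replace2, pv_B_merge (ls.map PySem.Chars.strip) (PySem.Chars.strip l0) h1 h2]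
  rw [List.range_eq_range', List.range'_succ, List.map_cons, List.foldl_cons]
  simp only [← Int.ofNat_eq_natCast]
  have hfirst : (if (decide ((0:Int) < Int.ofNat 0) &&
        PySem.Chars.endswith (PySem.Chars.rstrip ((PySem.List.pyGet? (l0 :: ls) (Int.ofNat 0 - 1)).getD [])) ['-']) = true then
      PySem.List.slice (PySem.Chars.rstrip ([] : List Char)) none (some (-1)) ++
        PySem.Chars.strip ((PySem.List.pyGet? (l0 :: ls) (Int.ofNat 0)).getD [])
    else ([] : List Char) ++ ' ' :: PySem.Chars.strip ((PySem.List.pyGet? (l0 :: ls) (Int.ofNat 0)).getD []))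
      = ' ' :: PySem.Chars.strip l0 := by
    rw [if_neg (by simp)]
    rw [show (Int.ofNat 0 : Int) = ((0 : ℕ) : Int) by simp, PySem.List.pyGet?_natCast]
    simp
  rw [hfirst]
  have hA := pv_A_fold (l0 :: ls) ls.length 1 (' ' :: PySem.Chars.strip l0) le_rfl (by simp; omega)
  simp only [show (0 + 1 : ℕ) = 1 from rfl] at hA ⊢
  rw [hA]
  rw [show (l0 :: ls).getD (1 - 1) [] = l0 from rfl, show (l0 :: ls).drop 1 = ls from rfl]
  rw [show (' ' :: PySem.Chars.strip l0) = [' '] ++ PySem.Chars.strip l0 from rfl]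
  rw [pv_foldA_merge ls l0 [' ']]
  rw [show ([' '] ++ pvMerge (PySem.Chars.strip l0) (ls.map PySem.Chars.strip))
        = ' ' :: pvMerge (PySem.Chars.strip l0) (ls.map PySem.Chars.strip) from rfl]
  rw [pv_strip_cons_space]
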